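-- pv_equiv track=rewrite | github.com/efatruth/Tskolin11 | MISCELANEOUS_ADVANCE/FORR3RR05DU-master/Skilaverkefni_3/python/verkefni_3.py | laStafir
-- ===== SOURCE A (Python) =====
-- from string import ascii_lowercase
-- from itertools import combinations
--
-- def laStafir(fStafir):
--     strengur = []
--     for i in combinations(ascii_lowercase,fStafir):
--         stafur = ""
--         for ii in i:
--             stafur += ii
--         strengur.append(stafur)
--     return strengur
-- ===== SOURCE B (Python) =====
-- from string import ascii_lowercase
--
-- def laStafir(fStafir):
--     n = len(ascii_lowercase)
--     def go(start, prefix, remaining):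
--         if remaining == 0:
--             return [prefix]
--         out = []
--         for i in range(start, n - remaining + 1):
--             out += go(i + 1, prefix + ascii_lowercase[i], remaining - 1)
--         return out
--     return go(0, "", fStafir)
-- ===== Notes on version B (the rewrite author's own statement) =====
-- stated objective: alternative
-- what changed: Replaces itertools.combinations plus an inner string-concatenation loop with a direct recursive backtracking generator that extends a prefix string letter by letter, pruning when too few letters remain.
import Mathlib
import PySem

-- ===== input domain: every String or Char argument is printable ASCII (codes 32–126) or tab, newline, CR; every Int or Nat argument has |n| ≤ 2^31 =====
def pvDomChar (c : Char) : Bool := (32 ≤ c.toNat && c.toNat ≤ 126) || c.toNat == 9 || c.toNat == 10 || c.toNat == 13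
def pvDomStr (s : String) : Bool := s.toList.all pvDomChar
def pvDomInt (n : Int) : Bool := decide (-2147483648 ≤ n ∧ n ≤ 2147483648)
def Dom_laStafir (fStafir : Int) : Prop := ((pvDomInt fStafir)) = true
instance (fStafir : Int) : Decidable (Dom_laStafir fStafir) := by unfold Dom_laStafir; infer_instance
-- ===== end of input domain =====

-- B replaces itertools.combinations with a direct recursive prefix-extending generator (alternative decomposition, same output order).
-- Pre_ excludes negative fStafir, on which A raises ValueError (itertools.combinations rejects negative r).


-- ===== PORT A =====
-- ascii_lowercase
def laStafir_alpha : List Char := "abcdefghijklmnopqrstuvwxyz".toList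

-- itertools.combinations over a list, in itertools' lexicographic-by-index order;
-- laStafir_combinations adds itertools' documented r > n short-circuit ("If r > n, the iterator is empty")
def laStafir_combs : List Char → Nat → List (List Char)
  | _, 0 => [[]]
  | [], _ + 1 => []
  | c :: rest, k + 1 =>
      (laStafir_combs rest k).map (fun cs => c :: cs) ++ laStafir_combs rest (k + 1)

def laStafir_combinations (pool : List Char) (r : Nat) : List (List Char) :=
  if pool.length < r then [] else laStafir_combs pool r

-- for i in combinations(...): stafur = ""; for ii in i: stafur += ii; strengur.append(stafur)
def laStafir (fStafir : Int) : List String :=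
  (laStafir_combinations laStafir_alpha fStafir.toNat).map
    (fun cs => cs.foldl (fun stafur ii => stafur.push ii) "")

-- ===== PORT B =====
-- go(start, prefix, remaining): letters is the suffix of the alphabet from start; the Python
-- loop bound range(start, 26 - remaining + 1) iterates exactly while remaining ≤ (length of the suffix).
def laStafir_go : List Char → String → Int → List String
  | letters, pre, r =>
    if r = 0 then [pre]
    else
      match letters with
      | [] => []
      | c :: rest =>
          if r ≤ ((c :: rest).length : Int) then
            laStafir_go rest (pre.push c) (r - 1) ++ laStafir_go rest pre r
          else []

def laStafir_alt (fStafir : Int) : List String :=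
  laStafir_go laStafir_alpha "" fStafir

-- ===== PRECONDITION & SPEC =====
-- A raises ValueError (from itertools.combinations) for negative fStafir; excluded.
def Pre_laStafir (fStafir : Int) : Prop := 0 ≤ fStafir
instance (fStafir : Int) : Decidable (Pre_laStafir fStafir) := by unfold Pre_laStafir; infer_instance
def pvWitness_laStafir : Int := (2)

def Spec_laStafir (fStafir : Int) (out : List String) : Prop := out = laStafir_alt fStafir
instance (fStafir : Int) (out : List String) : Decidable (Spec_laStafir fStafir out) := by unfold Spec_laStafir; infer_instance

-- ===== CLAIM (what is proved, stated in full; the proofs are below) =====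
def Claim_equal_laStafir : Prop := ∀ (fStafir : Int), Dom_laStafir fStafir → Pre_laStafir fStafir → Spec_laStafir fStafir (laStafir fStafir)

-- ===== LEMMAS AND PROOFS =====

lemma laStafir_combs_nil_of_lt (l : List Char) : ∀ (k : Nat), l.length < k → laStafir_combs l k = [] := by
  induction l with
  | nil =>
      intro k hk
      match k, hk with
      | k + 1, _ => rfl
  | cons c rest ih =>
      intro k hk
      match k, hk with
      | k + 1, hk =>
          simp only [laStafir_combs]
          have h1 : rest.length < k := by simpa using Nat.lt_of_succ_lt_succ hk
          rw [ih k h1, ih (k + 1) (Nat.lt_of_lt_of_le h1 (Nat.le_succ k))]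
          rfl

lemma laStafir_go_eq (l : List Char) : ∀ (pre : String) (r : Int), 0 ≤ r →
    laStafir_go l pre r
      = (laStafir_combs l r.toNat).map (fun cs => cs.foldl (fun s c => s.push c) pre) := by
  induction l with
  | nil =>
      intro pre r hr
      by_cases h0 : r = 0
      · subst h0; simp [laStafir_go, laStafir_combs]
      · have hpos : 0 < r := lt_of_le_of_ne hr (Ne.symm h0)
        obtain ⟨k, hk⟩ : ∃ k, r.toNat = k + 1 :=
          ⟨r.toNat - 1, by omega⟩
        rw [hk]
        simp [laStafir_go, laStafir_combs, h0]
  | cons c rest ih =>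
      intro pre r hr
      by_cases h0 : r = 0
      · subst h0; simp [laStafir_go, laStafir_combs]
      · have hpos : 0 < r := lt_of_le_of_ne hr (Ne.symm h0)
        obtain ⟨k, hk⟩ : ∃ k, r.toNat = k + 1 := ⟨r.toNat - 1, by omega⟩
        by_cases hlen : r ≤ ((c :: rest).length : Int)
        · have hlen' : r ≤ (rest.length : Int) + 1 := by simpa using hlen
          have hgo : laStafir_go (c :: rest) pre r
              = laStafir_go rest (pre.push c) (r - 1) ++ laStafir_go rest pre r := by
            simp [laStafir_go, h0, hlen']
          rw [hgo, ih (pre.push c) (r - 1) (by omega), ih pre r hr, hk]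
          have hk' : (r - 1).toNat = k := by omega
          rw [hk']
          simp only [laStafir_combs, List.map_append, List.map_map]
          congr 1
        · have hlen' : ¬ r ≤ (rest.length : Int) + 1 := by simpa using hlen
          have hgo : laStafir_go (c :: rest) pre r = [] := by
            simp [laStafir_go, h0, hlen']
          have hlt : (c :: rest).length < r.toNat := by
            simp only [List.length_cons] at hlen ⊢
            omega
          rw [hgo, laStafir_combs_nil_of_lt _ _ hlt]
          rfl

lemma laStafir_combinations_eq (pool : List Char) (r : Nat) :
    laStafir_combinations pool r = laStafir_combs pool r := by
  unfold laStafir_combinations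
  split
  · exact (laStafir_combs_nil_of_lt pool r (by assumption)).symm
  · rfl

-- ===== VERDICT (by name: the statement is the Claim_ definition above) =====
theorem laStafir_spec : Claim_equal_laStafir := by
  intro fStafir _ hpre
  unfold Spec_laStafir laStafir laStafir_alt
  rw [laStafir_combinations_eq]
  exact (laStafir_go_eq laStafir_alpha "" fStafir hpre).symm
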